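-- pv_equiv track=rewrite | github.com/ksh1ng/python_Exercise | ws_0407.py | pop_empty
-- ===== SOURCE A (Python) =====
-- def pop_empty(dict):
--     '''
--     Description:
--      It traverses the dictionary, popping (removing) any key-value pair
--      where the value is the empty list.
--     Parameter:
--      dict: a dictionary argument.
--     Return:
--      a dict after processing.
--     '''
--     #collect the keys where the value is the empty list.
--     alist = []
--     for key in dict:
--         value = dict[key]
--
--         if value == []:
--             alist.append(key)
--
--     #remove value of empty list:
--     for item in alist:
--         dict.pop(item)
--
--     return dict
-- ===== SOURCE B (Python) =====
-- def pop_empty(dict):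
--     kept = {k: v for k, v in dict.items() if v != []}
--     dict.clear()
--     dict.update(kept)
--     return dict
-- ===== Notes on version B (the rewrite author's own statement) =====
-- stated objective: simpler
-- what changed: Replaces the two-pass 'collect empty-valued keys, then pop each' strategy with a one-pass comprehension that computes the surviving entries and overwrites the dict in place via clear()+update().
import Mathlib
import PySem

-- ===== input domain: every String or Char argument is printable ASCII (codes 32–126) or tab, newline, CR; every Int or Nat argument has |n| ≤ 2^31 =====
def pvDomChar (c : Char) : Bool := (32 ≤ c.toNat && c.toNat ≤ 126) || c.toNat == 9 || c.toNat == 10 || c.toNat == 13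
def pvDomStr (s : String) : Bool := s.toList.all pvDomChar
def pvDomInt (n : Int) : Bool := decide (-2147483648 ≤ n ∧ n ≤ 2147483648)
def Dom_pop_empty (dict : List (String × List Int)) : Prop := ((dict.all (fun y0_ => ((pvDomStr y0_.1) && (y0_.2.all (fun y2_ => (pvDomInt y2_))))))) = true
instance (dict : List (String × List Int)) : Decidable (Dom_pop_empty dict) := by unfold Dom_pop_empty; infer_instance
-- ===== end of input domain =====

-- B replaces A's two passes (collect empty-valued keys, then pop each) by one filtering
-- comprehension overwriting the dict in place; the equivalence proved is about the RETURN
-- value (both Pythons mutate the argument dict to the same final contents).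

-- ===== PORT A =====
-- A: collect keys with empty value into alist, then pop each collected key.
def pop_empty (dict : List (String × List Int)) : List (String × List Int) :=
  let d := PySem.Dict.mk dict
  -- for key in dict: value = dict[key]; if value == []: alist.append(key)
  -- (dict[key] cannot raise here since key is drawn from the dict, so getD's default is dead)
  let alist : List String :=
    d.keys.foldl (fun acc k => if d.getD k [] == [] then acc ++ [k] else acc) []
  -- for item in alist: dict.pop(item)
  (alist.foldl (fun d' k => d'.erase k) d).items

-- ===== PORT B =====
-- B: kept = {k: v for k, v in dict.items() if v != []}; dict.clear(); dict.update(kept)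
def pop_empty_alt (dict : List (String × List Int)) : List (String × List Int) :=
  dict.filter (fun kv => kv.2 != [])

-- ===== PRECONDITION & SPEC =====
-- A Python dict cannot contain duplicate keys, so the association list has Nodup keys.
def Pre_pop_empty (dict : List (String × List Int)) : Prop :=
  (dict.map Prod.fst).Nodup
instance (dict : List (String × List Int)) : Decidable (Pre_pop_empty dict) := by
  unfold Pre_pop_empty; infer_instance

def pvWitness_pop_empty : (List (String × List Int)) :=
  [("a", [1]), ("b", []), ("c", [2, 3])]

def Spec_pop_empty (dict : List (String × List Int)) (out : List (String × List Int)) : Prop := out = pop_empty_alt dict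
instance (dict : List (String × List Int)) (out : List (String × List Int)) : Decidable (Spec_pop_empty dict out) := by unfold Spec_pop_empty; infer_instance

-- ===== CLAIM (what is proved, stated in full; the proofs are below) =====
def Claim_equal_pop_empty : Prop := ∀ (dict : List (String × List Int)), Dom_pop_empty dict → Pre_pop_empty dict → Spec_pop_empty dict (pop_empty dict)

-- ===== LEMMAS AND PROOFS =====

-- Folding `erase` over a list of keys filters out every entry whose key occurs in the list.
theorem foldl_erase_items (L : List String) (d : PySem.Dict String (List Int)) :
    (L.foldl (fun d' k => d'.erase k) d).items
      = d.items.filter (fun p => !L.contains p.1) := by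
  induction L generalizing d with
  | nil => simp
  | cons k L ih =>
      rw [List.foldl_cons, ih]
      simp only [PySem.Dict.erase, List.filter_filter]
      apply List.filter_congr
      intro p _
      by_cases h : p.1 = k <;> simp [h]

theorem pop_empty_spec_aux (dict : List (String × List Int))
    (hn : (dict.map Prod.fst).Nodup) :
    pop_empty dict = pop_empty_alt dict := by
  unfold pop_empty pop_empty_alt
  simp only [PySem.List.foldl_append_if_eq_filter, List.nil_append, foldl_erase_items]
  apply List.filter_congr
  rintro ⟨k, v⟩ hp
  have hkeys : (PySem.Dict.mk dict).keys.Nodup := hn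
  have hitems : (k, v) ∈ (PySem.Dict.mk dict).items := hp
  have hget : (PySem.Dict.mk dict).getD k [] = v :=
    PySem.Dict.getD_of_mem_items _ hitems hkeys []
  have hmemk : k ∈ (PySem.Dict.mk dict).keys :=
    PySem.Dict.mem_keys_of_mem_items _ hitems
  by_cases h2 : v = []
  · simp only [PySem.Dict.keys] at hmemk
    simp [h2, hget, List.mem_filter, hmemk]
  · simp [List.mem_filter, hget, h2]

-- ===== VERDICT (by name: the statement is the Claim_ definition above) =====
theorem pop_empty_spec : Claim_equal_pop_empty := by
  intro dict _ hpre
  exact pop_empty_spec_aux dict hpre
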